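-- pv_equiv track=rewrite | github.com/yzlzbql/commit-agent | minimal_agent/analysis/service.py | _python_block_end
-- ===== SOURCE A (Python) =====
-- def _python_block_end(lines: list[str], start_line: int) -> int:
--     base = lines[start_line - 1]
--     indent = len(base) - len(base.lstrip())
--     if not base.rstrip().endswith(":"):
--         return start_line
--     end = start_line
--     for idx in range(start_line, len(lines)):
--         cur = lines[idx]
--         if not cur.strip():
--             continue
--         cur_indent = len(cur) - len(cur.lstrip())
--         if cur_indent <= indent:
--             break
--         end = idx + 1
--     return max(end, start_line)
-- ===== SOURCE B (Python) =====
-- def _python_block_end(lines: list[str], start_line: int) -> int: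
--     base = lines[start_line - 1]
--     indent = len(base) - len(base.lstrip())
--     if not base.rstrip().endswith(":"):
--         return start_line
--     # phase 1: find the first boundary line (non-blank, indent <= base's)
--     stop = len(lines)
--     for idx in range(start_line, len(lines)):
--         cur = lines[idx]
--         if cur.strip() and len(cur) - len(cur.lstrip()) <= indent:
--             stop = idx
--             break
--     # phase 2: scan the region backwards for the last non-blank line
--     for idx in reversed(range(start_line, stop)):
--         if lines[idx].strip():
--             return idx + 1
--     return start_line
-- ===== Notes on version B (the rewrite author's own statement) =====
-- stated objective: alternative
-- what changed: Replaces A's single forward pass with a running `end` accumulator by a two-phase algorithm: first find the index of the first boundary line (non-blank with indent <= base's), then scan the region backwards for the last non-blank line.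
import Mathlib
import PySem

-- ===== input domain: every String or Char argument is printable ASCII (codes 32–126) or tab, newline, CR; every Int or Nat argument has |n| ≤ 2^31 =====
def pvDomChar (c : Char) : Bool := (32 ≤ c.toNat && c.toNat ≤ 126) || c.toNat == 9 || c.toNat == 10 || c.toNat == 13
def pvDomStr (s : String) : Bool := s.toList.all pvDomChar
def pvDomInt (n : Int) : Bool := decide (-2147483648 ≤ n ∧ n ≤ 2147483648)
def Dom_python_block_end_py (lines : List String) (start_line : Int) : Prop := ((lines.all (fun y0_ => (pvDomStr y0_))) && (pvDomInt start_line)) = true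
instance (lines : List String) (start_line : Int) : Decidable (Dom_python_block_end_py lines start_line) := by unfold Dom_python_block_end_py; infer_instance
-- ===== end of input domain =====

-- B replaces A's single pass with a running `end` accumulator by two passes: find the first
-- boundary line, then scan the region backwards for the last non-blank line (alternative decomposition, same cost).

-- ===== PORT A =====
-- per-line primitives of A's loop (`not cur.strip()` and the indent width)
def pvBlank (s : String) : Bool := PySem.Str.strip s == ""
def pvIndent (s : String) : Int := PySem.Str.len s - PySem.Str.len (PySem.Str.lstrip s)
def pvLine (lines : List String) (idx : Int) : String := (PySem.List.pyGet? lines idx).getD ""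

-- the `for idx in range(start_line, len(lines))` loop with its running `end`
def pvALoop (lines : List String) (indent : Int) : List Int → Int → Int
  | [], e => e
  | idx :: rest, e =>
    let cur := pvLine lines idx
    if pvBlank cur then pvALoop lines indent rest e
    else if pvIndent cur ≤ indent then e
    else pvALoop lines indent rest (idx + 1)

def python_block_end_py (lines : List String) (start_line : Int) : Int :=
  let base := pvLine lines (start_line - 1)
  let indent := pvIndent base
  if ¬ (PySem.Str.endswith (PySem.Str.rstrip base) ":") then start_line
  else
    max (pvALoop lines indent (PySem.List.pyRange start_line lines.length 1) start_line) start_line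

-- ===== PORT B =====
-- phase 1: first index whose line is non-blank with indent ≤ base's (default: len(lines))
def pvStop (lines : List String) (indent : Int) (dflt : Int) : List Int → Int
  | [] => dflt
  | i :: r =>
    let s := (PySem.List.pyGet? lines i).getD ""
    if PySem.Str.strip s ≠ "" ∧ PySem.Str.len s - PySem.Str.len (PySem.Str.lstrip s) ≤ indent then i
    else pvStop lines indent dflt r

-- phase 2: `for idx in reversed(range(start_line, stop))` — first non-blank from the back
def pvLast (lines : List String) : List Int → Option Int
  | [] => none
  | i :: r =>
    if PySem.Str.strip ((PySem.List.pyGet? lines i).getD "") ≠ "" then some i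
    else pvLast lines r

def python_block_end_py_alt (lines : List String) (start_line : Int) : Int :=
  let base := (PySem.List.pyGet? lines (start_line - 1)).getD ""
  let indent := PySem.Str.len base - PySem.Str.len (PySem.Str.lstrip base)
  if ¬ (PySem.Str.endswith (PySem.Str.rstrip base) ":") then start_line
  else
    let stop := pvStop lines indent lines.length (PySem.List.pyRange start_line lines.length 1)
    match pvLast lines (PySem.List.pyRange start_line stop 1).reverse with
    | some i => i + 1
    | none => start_line

-- ===== PRECONDITION & SPEC =====
-- Pre_ excludes exactly the inputs where `lines[start_line - 1]` raises IndexError (both A and B raise there).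
def Pre_python_block_end_py (lines : List String) (start_line : Int) : Prop :=
  PySem.Raise.InRange lines.length (start_line - 1)
instance (lines : List String) (start_line : Int) : Decidable (Pre_python_block_end_py lines start_line) := by unfold Pre_python_block_end_py; infer_instance

def pvWitness_python_block_end_py : List String × Int := (["def f():", "  x"], 1)

def Spec_python_block_end_py (lines : List String) (start_line : Int) (out : Int) : Prop := out = python_block_end_py_alt lines start_line
instance (lines : List String) (start_line : Int) (out : Int) : Decidable (Spec_python_block_end_py lines start_line out) := by unfold Spec_python_block_end_py; infer_instance

-- ===== CLAIM (what is proved, stated in full; the proofs are below) =====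
def Claim_equal_python_block_end_py : Prop := ∀ (lines : List String) (start_line : Int), Dom_python_block_end_py lines start_line → Pre_python_block_end_py lines start_line → Spec_python_block_end_py lines start_line (python_block_end_py lines start_line)

-- ===== LEMMAS AND PROOFS =====

-- pvLast scans left to right, so on an append it prefers the left part
theorem pvLast_append (lines : List String) (l1 l2 : List Int) :
    pvLast lines (l1 ++ l2) = (pvLast lines l1).or (pvLast lines l2) := by
  induction l1 with
  | nil => simp [pvLast]
  | cons i r ih =>
    simp only [List.cons_append, pvLast]
    split_ifs with h
    · rfl
    · exact ih

theorem pvLast_mem (lines : List String) (l : List Int) (i : Int)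
    (h : pvLast lines l = some i) : i ∈ l := by
  induction l with
  | nil => simp [pvLast] at h
  | cons j r ih =>
    simp only [pvLast] at h
    split_ifs at h with hj
    · cases h; exact List.mem_cons_self
    · exact List.mem_cons_of_mem _ (ih h)

theorem pvStop_cases (lines : List String) (indent dflt : Int) (r : List Int) :
    pvStop lines indent dflt r = dflt ∨ pvStop lines indent dflt r ∈ r := by
  induction r with
  | nil => left; rfl
  | cons i rest ih =>
    simp only [pvStop]
    split_ifs with h
    · right; exact List.mem_cons_self
    · rcases ih with h' | h'
      · left; exact h'
      · right; exact List.mem_cons_of_mem _ h'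

-- main bridge: A's forward accumulator loop equals B's stop-then-backward-scan
theorem pvMain (lines : List String) (indent b : Int) :
    ∀ (n : Nat) (a e : Int), (b - a).toNat ≤ n →
      pvALoop lines indent (PySem.List.pyRange a b 1) e
        = match pvLast lines
            (PySem.List.pyRange a (pvStop lines indent b (PySem.List.pyRange a b 1)) 1).reverse with
          | some i => i + 1
          | none => e := by
  intro n
  induction n with
  | zero =>
    intro a e hn
    have hba : b ≤ a := by omega
    rw [PySem.List.pyRange_one_eq_nil hba]
    simp only [pvStop]
    rw [PySem.List.pyRange_one_eq_nil hba]
    rfl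
  | succ n ih =>
    intro a e hn
    by_cases hab : b ≤ a
    · rw [PySem.List.pyRange_one_eq_nil hab]
      simp only [pvStop]
      rw [PySem.List.pyRange_one_eq_nil hab]
      rfl
    · have hab' : a < b := by omega
      rw [PySem.List.pyRange_one_cons hab']
      simp only [pvALoop, pvStop]
      by_cases hbd : PySem.Str.strip ((PySem.List.pyGet? lines a).getD "") ≠ "" ∧
          PySem.Str.len ((PySem.List.pyGet? lines a).getD "") -
            PySem.Str.len (PySem.Str.lstrip ((PySem.List.pyGet? lines a).getD "")) ≤ indent
      · -- boundary line: A breaks, B's stop is a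
        rw [if_pos hbd]
        rw [if_neg (by simp [pvBlank, pvLine, hbd.1]), if_pos (by simpa [pvIndent, pvLine] using hbd.2)]
        rw [PySem.List.pyRange_one_eq_nil (le_refl a)]
        rfl
      · rw [if_neg hbd]
        -- B's stop comes from the tail; it is > a
        set s' := pvStop lines indent b (PySem.List.pyRange (a + 1) b 1) with hs'
        have hs'gt : a < s' := by
          rcases pvStop_cases lines indent b (PySem.List.pyRange (a + 1) b 1) with h | h
          · omega
          · have := (PySem.List.mem_pyRange_one.mp h).1; omega
        rw [PySem.List.pyRange_one_cons hs'gt]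
        rw [List.reverse_cons, pvLast_append]
        by_cases hblank : PySem.Str.strip ((PySem.List.pyGet? lines a).getD "") = ""
        · rw [if_pos (by simp [pvBlank, pvLine, hblank])]
          have h2 : pvLast lines [a] = none := by simp [pvLast, hblank]
          rw [h2]
          rw [ih (a + 1) e (by omega)]
          cases pvLast lines (PySem.List.pyRange (a + 1) s' 1).reverse <;> rfl
        · have hdeep : ¬ pvIndent (pvLine lines a) ≤ indent := by
            intro hle
            exact hbd ⟨hblank, by simpa [pvIndent, pvLine] using hle⟩
          rw [if_neg (by simp [pvBlank, pvLine, hblank]), if_neg hdeep]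
          have h2 : pvLast lines [a] = some a := by simp [pvLast, hblank]
          rw [h2]
          rw [ih (a + 1) (a + 1) (by omega)]
          cases pvLast lines (PySem.List.pyRange (a + 1) s' 1).reverse <;> rfl

-- ===== VERDICT (by name: the statement is the Claim_ definition above) =====
theorem python_block_end_py_spec : Claim_equal_python_block_end_py := by
  intro lines start_line _ _
  unfold Spec_python_block_end_py python_block_end_py python_block_end_py_alt
  simp only [pvLine]
  by_cases h : PySem.Str.endswith (PySem.Str.rstrip ((PySem.List.pyGet? lines (start_line - 1)).getD "")) ":" = true
  · rw [if_neg (not_not_intro h), if_neg (not_not_intro h)]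
    rw [pvMain lines _ (lines.length : Int) ((lines.length : Int) - start_line).toNat start_line start_line (le_refl _)]
    simp only [pvIndent]
    cases hlast : pvLast lines
        (PySem.List.pyRange start_line
          (pvStop lines
            (PySem.Str.len ((PySem.List.pyGet? lines (start_line - 1)).getD "") -
              PySem.Str.len (PySem.Str.lstrip ((PySem.List.pyGet? lines (start_line - 1)).getD "")))
            lines.length (PySem.List.pyRange start_line lines.length 1))
          1).reverse with
    | none => simp
    | some i =>
      have hmem := pvLast_mem _ _ _ hlast
      rw [List.mem_reverse] at hmem
      have := (PySem.List.mem_pyRange_one.mp hmem).1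
      dsimp only
      have h1 : start_line ≤ i + 1 := by omega
      exact max_eq_left h1
  · rw [if_pos h, if_pos h]
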